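-- pv_equiv track=rewrite | github.com/rhkdguskim/Study | Algorithm/python/programers/빛의경로사이클.py | solution
-- ===== SOURCE A (Python) =====
-- def solution(grid):
--     IN = 0
--     OUT = 1
--     # RIGHT, DOWN, LEFT, UP
--     moves = [(0, 1), (1, 0), (0, -1), (-1, 0)]
--
--     def chage_dir(dir, type):
--         if type == 'S':
--             pass
--         elif type == 'L':
--             dir -= 1
--         elif type == 'R':
--             dir += 1
--         return dir % 4
--
--     def change_pos(i, j):
--         return [i % rows, j % cols]
--
--     rows = len(grid)
--     cols = len(grid[0])
--
--     visited = [[set() for _ in range(cols)] for _ in range(rows)]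
--
--     def dfs(i, j, dir):
--         visited[i][j].add((dir, OUT))
--         ny, nx = change_pos(moves[dir][0] + i, moves[dir][1] + j)
--         dir = chage_dir(dir, grid[ny][nx])
--
--         if (dir, IN) in visited[ny][nx]:
--             return 0
--
--         visited[ny][nx].add((dir, IN))
--         return dfs(ny, nx, dir) + 1
--
--     answer = []
--     for i in range(rows):
--         for j in range(cols):
--             for m in range(4):
--                 if (m, OUT) not in visited[i][j]:
--                     answer.append(dfs(i, j, m))
--
--     if answer:
--         answer.sort()
--
--     return answer
-- ===== SOURCE B (Python) =====
-- def solution(grid):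
--     rows, cols = len(grid), len(grid[0])
--     seen_out = set()   # states (i, j, di, dj) already left in direction (di, dj)
--     seen_in = set()    # states already entered with direction (di, dj)
--     answer = []
--     for si in range(rows):
--         for sj in range(cols):
--             for sdi, sdj in ((0, 1), (1, 0), (0, -1), (-1, 0)):
--                 if (si, sj, sdi, sdj) in seen_out:
--                     continue
--                 i, j, di, dj = si, sj, sdi, sdj
--                 steps = 0
--                 while True:
--                     seen_out.add((i, j, di, dj))
--                     i, j = (i + di) % rows, (j + dj) % cols
--                     c = grid[i][j]
--                     if c == 'L':
--                         di, dj = -dj, di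
--                     elif c == 'R':
--                         di, dj = dj, -di
--                     if (i, j, di, dj) in seen_in:
--                         break
--                     seen_in.add((i, j, di, dj))
--                     steps += 1
--                 answer.append(steps)
--     answer.sort()
--     return answer
-- ===== Notes on version B (the rewrite author's own statement) =====
-- stated objective: alternative
-- what changed: The recursive dfs over a 2-d array of per-cell sets of (direction-index, IN/OUT) pairs is replaced by an iterative path follower that carries the direction as a unit vector rotated in place on 'L'/'R' (no moves table, no mod-4 index arithmetic) and records progress in two flat sets of (i, j, di, dj) states, one for exits and one for entries; the guarded sort is dropped (sorting [] is a no-op).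
import Mathlib
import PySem

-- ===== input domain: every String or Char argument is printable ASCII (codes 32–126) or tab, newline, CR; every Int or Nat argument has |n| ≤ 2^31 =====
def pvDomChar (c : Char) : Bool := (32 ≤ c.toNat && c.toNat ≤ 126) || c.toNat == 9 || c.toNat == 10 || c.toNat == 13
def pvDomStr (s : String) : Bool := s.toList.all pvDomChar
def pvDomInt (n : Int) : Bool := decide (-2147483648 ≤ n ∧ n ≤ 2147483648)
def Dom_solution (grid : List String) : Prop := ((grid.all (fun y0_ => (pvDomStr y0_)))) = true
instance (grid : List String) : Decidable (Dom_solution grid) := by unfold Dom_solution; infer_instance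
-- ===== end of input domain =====

-- B replaces A's recursive dfs over per-cell sets of (direction-index, IN/OUT) pairs by an
-- iterative path follower that carries the direction as a unit VECTOR rotated in place on 'L'/'R'
-- (no moves table, no mod-4 arithmetic) and keeps two flat sets of (i, j, di, dj) states,
-- one for exits and one for entries; B sorts unconditionally (sorting [] is a no-op).

-- ===== PORT A =====
-- visited[i][j] holding (dir, IN/OUT) is represented as ONE Python set of keys (i, j, dir, typ)
-- with IN = 0, OUT = 1 — same membership/add operations, flat key instead of a 2-d array of sets.
abbrev SetK := PySem.Set (Int × Int × Int × Int)

-- moves = [(0,1),(1,0),(0,-1),(-1,0)]; moves[dir] — dir is always in {0,1,2,3} at call sites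
def movesGet (d : Int) : Int × Int :=
  if d = 0 then (0, 1) else if d = 1 then (1, 0) else if d = 2 then (0, -1) else (-1, 0)

-- grid[ny][nx]; the defaults are only reachable outside Pre_solution (where Python raises)
def gridAt (grid : List String) (ny nx : Int) : Char :=
  (PySem.Str.pyGet? ((PySem.List.pyGet? grid ny).getD "") nx).getD ' '

-- chage_dir(dir, type): dir % 4 applied in every branch, as in A
def chageDir (dir : Int) (t : Char) : Int :=
  PySem.Int.mod (if t = 'S' then dir else if t = 'L' then dir - 1 else if t = 'R' then dir + 1 else dir) 4

-- dfs(i, j, dir); fuel only makes the recursion total — on Pre_ inputs each recursive call adds a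
-- fresh (ny,nx,dir,IN) key out of < 8*rows*cols possible keys, so fuel 8*rows*cols+8 never runs out
def dfsA (grid : List String) (rows cols : Int) : Nat → SetK → Int → Int → Int → Int × SetK
  | 0, visited, _, _, _ => (0, visited)
  | Nat.succ fuel, visited, i, j, dir =>
    let visited := PySem.Set.add visited (i, j, dir, 1)
    let mv := movesGet dir
    let ny := PySem.Int.mod (mv.1 + i) rows
    let nx := PySem.Int.mod (mv.2 + j) cols
    let dir2 := chageDir dir (gridAt grid ny nx)
    if PySem.Set.contains visited (ny, nx, dir2, 0) then (0, visited)
    else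
      let r := dfsA grid rows cols fuel (PySem.Set.add visited (ny, nx, dir2, 0)) ny nx dir2
      (r.1 + 1, r.2)

-- body of A's innermost loop: if (m, OUT) not in visited[i][j]: answer.append(dfs(i, j, m))
def innerA (grid : List String) (rows cols : Int) (fuel : Nat) (i j : Int)
    (st : SetK × List Int) (m : Int) : SetK × List Int :=
  if ¬ PySem.Set.contains st.1 (i, j, m, 1) then
    let r := dfsA grid rows cols fuel st.1 i j m
    (r.2, st.2 ++ [r.1])
  else st

def solution (grid : List String) : List Int :=
  let rows : Int := grid.length
  let cols : Int := PySem.Str.len ((PySem.List.pyGet? grid 0).getD "")   -- len(grid[0]); IndexError on [] is excluded by Pre_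
  let fuel : Nat := (8 * rows * cols).toNat + 8
  let st :=
    (PySem.List.pyRange 0 rows 1).foldl (fun st i =>
      (PySem.List.pyRange 0 cols 1).foldl (fun st j =>
        (PySem.List.pyRange 0 4 1).foldl (innerA grid rows cols fuel i j) st) st)
      ((PySem.Set.empty : SetK), ([] : List Int))
  if st.2 = [] then st.2 else PySem.List.sorted st.2 (fun x => x) false

-- ===== PORT B =====
-- B's state space: (i, j, di, dj) with (di, dj) a unit direction vector
abbrev StB := PySem.Set (Int × Int × Int × Int) × PySem.Set (Int × Int × Int × Int) × List Int

-- the while loop: mark exit, wrap-step, rotate the vector on 'L'/'R', break if entry seen,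
-- else mark entry, advance, count
def walkB (grid : List String) (rows cols : Int) :
    Nat → PySem.Set (Int × Int × Int × Int) → PySem.Set (Int × Int × Int × Int) →
    Int → Int → Int → Int → Int →
    Int × PySem.Set (Int × Int × Int × Int) × PySem.Set (Int × Int × Int × Int)
  | 0, sOut, sIn, _, _, _, _, steps => (steps, sOut, sIn)
  | Nat.succ fuel, sOut, sIn, i, j, di, dj, steps =>
    let sOut := PySem.Set.add sOut (i, j, di, dj)
    let ni := PySem.Int.mod (i + di) rows
    let nj := PySem.Int.mod (j + dj) cols
    let c := (PySem.Str.pyGet? ((PySem.List.pyGet? grid ni).getD "") nj).getD ' '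
    let v := if c = 'L' then (-dj, di) else if c = 'R' then (dj, -di) else (di, dj)
    if PySem.Set.contains sIn (ni, nj, v.1, v.2) then (steps, sOut, sIn)
    else walkB grid rows cols fuel sOut (PySem.Set.add sIn (ni, nj, v.1, v.2)) ni nj v.1 v.2 (steps + 1)

-- body of B's innermost loop, one start direction vector (sdi, sdj)
def innerB (grid : List String) (rows cols : Int) (fuel : Nat) (si sj : Int)
    (st : StB) (v : Int × Int) : StB :=
  if PySem.Set.contains st.1 (si, sj, v.1, v.2) then st
  else
    let r := walkB grid rows cols fuel st.1 st.2.1 si sj v.1 v.2 0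
    (r.2.1, r.2.2, st.2.2 ++ [r.1])

def solution_alt (grid : List String) : List Int :=
  let rows : Int := grid.length
  let cols : Int := PySem.Str.len ((PySem.List.pyGet? grid 0).getD "")
  let fuel : Nat := (8 * rows * cols).toNat + 8
  let st :=
    (PySem.List.pyRange 0 rows 1).foldl (fun st si =>
      (PySem.List.pyRange 0 cols 1).foldl (fun st sj =>
        [((0:Int), (1:Int)), (1, 0), (0, -1), (-1, 0)].foldl (innerB grid rows cols fuel si sj) st) st)
      ((PySem.Set.empty : PySem.Set (Int × Int × Int × Int)),
       (PySem.Set.empty : PySem.Set (Int × Int × Int × Int)), ([] : List Int))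
  PySem.List.sorted st.2.2 (fun x => x) false

-- ===== PRECONDITION & SPEC =====
-- Pre_ excludes exactly the inputs where A raises IndexError: the empty grid (len(grid[0])), and
-- grids with a row shorter than row 0 (the path wraps through every column of every row it starts in).
def Pre_solution (grid : List String) : Prop :=
  grid ≠ [] ∧ ∀ s ∈ grid, PySem.Str.len (grid.headD "") ≤ PySem.Str.len s
instance (grid : List String) : Decidable (Pre_solution grid) := by unfold Pre_solution; infer_instance

def pvWitness_solution : List String := ["SL", "RS"]

def Spec_solution (grid : List String) (out : List Int) : Prop := out = solution_alt grid
instance (grid : List String) (out : List Int) : Decidable (Spec_solution grid out) := by unfold Spec_solution; infer_instance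

-- ===== CLAIM (what is proved, stated in full; the proofs are below) =====
def Claim_equal_solution : Prop := ∀ (grid : List String), Dom_solution grid → Pre_solution grid → Spec_solution grid (solution grid)

-- ===== LEMMAS AND PROOFS =====

-- membership relation between A's flat (i, j, dir, IN/OUT) set and B's pair of (i, j, di, dj)
-- sets, through the direction-index → direction-vector translation movesGet
def RelV (vA sOut sIn : PySem.Set (Int × Int × Int × Int)) : Prop :=
  ∀ (a b d : Int), 0 ≤ d → d < 4 →
    (((a, b, d, 1) ∈ vA) ↔ ((a, b, (movesGet d).1, (movesGet d).2) ∈ sOut)) ∧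
    (((a, b, d, 0) ∈ vA) ↔ ((a, b, (movesGet d).1, (movesGet d).2) ∈ sIn))

lemma contains_iff_mem (s : PySem.Set (Int × Int × Int × Int)) (x : Int × Int × Int × Int) :
    PySem.Set.contains s x = true ↔ x ∈ s := by
  simp [PySem.Set.contains]

lemma movesGet_inj {d d' : Int} (h0 : 0 ≤ d) (h4 : d < 4) (h0' : 0 ≤ d') (h4' : d' < 4)
    (h : movesGet d = movesGet d') : d = d' := by
  interval_cases d <;> interval_cases d' <;> simp_all [movesGet]

-- B's in-place rotation computes the vector of A's chage_dir result
lemma rot_eq (d : Int) (c : Char) (h0 : 0 ≤ d) (h4 : d < 4) :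
    (if c = 'L' then (-(movesGet d).2, (movesGet d).1)
     else if c = 'R' then ((movesGet d).2, -(movesGet d).1)
     else movesGet d) = movesGet (chageDir d c) := by
  unfold chageDir
  by_cases hS : c = 'S'
  · interval_cases d <;> simp [hS, movesGet, PySem.Int.mod]
  · by_cases hL : c = 'L'
    · interval_cases d <;> simp [hL, movesGet, PySem.Int.mod]
    · by_cases hR : c = 'R'
      · interval_cases d <;> simp [hR, movesGet, PySem.Int.mod]
      · interval_cases d <;> simp [hS, hL, hR, movesGet, PySem.Int.mod]

lemma chageDir_bounds (d : Int) (c : Char) : 0 ≤ chageDir d c ∧ chageDir d c < 4 := by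
  unfold chageDir
  exact ⟨PySem.Int.mod_nonneg _ (by norm_num), PySem.Int.mod_lt _ (by norm_num)⟩

-- adding an OUT mark on both sides preserves the relation
lemma RelV_add_out {vA sOut sIn : PySem.Set (Int × Int × Int × Int)} (h : RelV vA sOut sIn)
    (a b d : Int) (h0 : 0 ≤ d) (h4 : d < 4) :
    RelV (PySem.Set.add vA (a, b, d, 1)) (PySem.Set.add sOut (a, b, (movesGet d).1, (movesGet d).2)) sIn := by
  intro a' b' d' h0' h4'
  obtain ⟨hout, hin⟩ := h a' b' d' h0' h4'
  refine ⟨?_, ?_⟩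
  · rw [PySem.Set.mem_add, PySem.Set.mem_add]
    constructor
    · rintro (hm | he)
      · exact Or.inl (hout.mp hm)
      · have : a' = a ∧ b' = b ∧ d' = d := by simpa [Prod.ext_iff] using he
        obtain ⟨ha, hb, hd⟩ := this
        subst ha hb hd; exact Or.inr rfl
    · rintro (hm | he)
      · exact Or.inl (hout.mpr hm)
      · have : a' = a ∧ b' = b ∧ movesGet d' = movesGet d := by
          simpa [Prod.ext_iff] using he
        obtain ⟨ha, hb, hmv⟩ := this
        have hd := movesGet_inj h0' h4' h0 h4 hmv
        subst ha hb hd; exact Or.inr rfl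
  · rw [PySem.Set.mem_add]
    constructor
    · rintro (hm | he)
      · exact hin.mp hm
      · exfalso; simpa using congrArg (fun p => p.2.2.2) he
    · intro hm; exact Or.inl (hin.mpr hm)

-- adding an IN mark on both sides preserves the relation
lemma RelV_add_in {vA sOut sIn : PySem.Set (Int × Int × Int × Int)} (h : RelV vA sOut sIn)
    (a b d : Int) (h0 : 0 ≤ d) (h4 : d < 4) :
    RelV (PySem.Set.add vA (a, b, d, 0)) sOut (PySem.Set.add sIn (a, b, (movesGet d).1, (movesGet d).2)) := by
  intro a' b' d' h0' h4'
  obtain ⟨hout, hin⟩ := h a' b' d' h0' h4'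
  refine ⟨?_, ?_⟩
  · rw [PySem.Set.mem_add]
    constructor
    · rintro (hm | he)
      · exact hout.mp hm
      · exfalso; simpa using congrArg (fun p => p.2.2.2) he
    · intro hm; exact Or.inl (hout.mpr hm)
  · rw [PySem.Set.mem_add, PySem.Set.mem_add]
    constructor
    · rintro (hm | he)
      · exact Or.inl (hin.mp hm)
      · have : a' = a ∧ b' = b ∧ d' = d := by simpa [Prod.ext_iff] using he
        obtain ⟨ha, hb, hd⟩ := this
        subst ha hb hd; exact Or.inr rfl
    · rintro (hm | he)
      · exact Or.inl (hin.mpr hm)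
      · have : a' = a ∧ b' = b ∧ movesGet d' = movesGet d := by
          simpa [Prod.ext_iff] using he
        obtain ⟨ha, hb, hmv⟩ := this
        have hd := movesGet_inj h0' h4' h0 h4 hmv
        subst ha hb hd; exact Or.inr rfl

-- related sets give the same membership-test result (as Bools)
lemma contains_eq_of_relV_in {vA sOut sIn : PySem.Set (Int × Int × Int × Int)}
    (h : RelV vA sOut sIn) (a b d : Int) (h0 : 0 ≤ d) (h4 : d < 4) :
    PySem.Set.contains vA (a, b, d, 0) = PySem.Set.contains sIn (a, b, (movesGet d).1, (movesGet d).2) := by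
  have := (h a b d h0 h4).2
  by_cases hm : (a, b, d, 0) ∈ vA
  · rw [(contains_iff_mem _ _).mpr hm, ((contains_iff_mem _ _).mpr (this.mp hm)).symm]
  · have h1 : PySem.Set.contains vA (a, b, d, 0) = false := by
      rw [← Bool.not_eq_true]; exact fun hc => hm ((contains_iff_mem _ _).mp hc)
    have h2 : PySem.Set.contains sIn (a, b, (movesGet d).1, (movesGet d).2) = false := by
      rw [← Bool.not_eq_true]; exact fun hc => hm (this.mpr ((contains_iff_mem _ _).mp hc))
    rw [h1, h2]

lemma contains_eq_of_relV_out {vA sOut sIn : PySem.Set (Int × Int × Int × Int)}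
    (h : RelV vA sOut sIn) (a b d : Int) (h0 : 0 ≤ d) (h4 : d < 4) :
    PySem.Set.contains vA (a, b, d, 1) = PySem.Set.contains sOut (a, b, (movesGet d).1, (movesGet d).2) := by
  have := (h a b d h0 h4).1
  by_cases hm : (a, b, d, 1) ∈ vA
  · rw [(contains_iff_mem _ _).mpr hm, ((contains_iff_mem _ _).mpr (this.mp hm)).symm]
  · have h1 : PySem.Set.contains vA (a, b, d, 1) = false := by
      rw [← Bool.not_eq_true]; exact fun hc => hm ((contains_iff_mem _ _).mp hc)
    have h2 : PySem.Set.contains sOut (a, b, (movesGet d).1, (movesGet d).2) = false := by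
      rw [← Bool.not_eq_true]; exact fun hc => hm (this.mpr ((contains_iff_mem _ _).mp hc))
    rw [h1, h2]

-- the iterative vector walker simulates dfs step for step
lemma walkB_eq_dfsA (grid : List String) (rows cols : Int) :
    ∀ (fuel : Nat) (vA sOut sIn : PySem.Set (Int × Int × Int × Int)) (i j d steps : Int),
      RelV vA sOut sIn → 0 ≤ d → d < 4 →
      (walkB grid rows cols fuel sOut sIn i j (movesGet d).1 (movesGet d).2 steps).1
          = (dfsA grid rows cols fuel vA i j d).1 + steps ∧
      RelV (dfsA grid rows cols fuel vA i j d).2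
          (walkB grid rows cols fuel sOut sIn i j (movesGet d).1 (movesGet d).2 steps).2.1
          (walkB grid rows cols fuel sOut sIn i j (movesGet d).1 (movesGet d).2 steps).2.2 := by
  intro fuel
  induction fuel with
  | zero =>
    intro vA sOut sIn i j d steps hrel _ _
    constructor
    · simp [walkB, dfsA]
    · simpa [walkB, dfsA] using hrel
  | succ fuel ih =>
    intro vA sOut sIn i j d steps hrel h0 h4
    rw [walkB, dfsA]
    dsimp only
    have hcomm1 : i + (movesGet d).1 = (movesGet d).1 + i := by ring
    have hcomm2 : j + (movesGet d).2 = (movesGet d).2 + j := by ring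
    rw [hcomm1, hcomm2]
    set ny := PySem.Int.mod ((movesGet d).1 + i) rows with hny
    set nx := PySem.Int.mod ((movesGet d).2 + j) cols with hnx
    have hc : (PySem.Str.pyGet? ((PySem.List.pyGet? grid ny).getD "") nx).getD ' ' = gridAt grid ny nx := rfl
    rw [hc, rot_eq d (gridAt grid ny nx) h0 h4]
    set d2 := chageDir d (gridAt grid ny nx) with hd2
    obtain ⟨hd20, hd24⟩ := chageDir_bounds d (gridAt grid ny nx)
    have hrel1 : RelV (PySem.Set.add vA (i, j, d, 1))
        (PySem.Set.add sOut (i, j, (movesGet d).1, (movesGet d).2)) sIn :=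
      RelV_add_out hrel i j d h0 h4
    have hcont := contains_eq_of_relV_in hrel1 ny nx d2 hd20 hd24
    by_cases hmem : PySem.Set.contains (PySem.Set.add vA (i, j, d, 1)) (ny, nx, d2, 0) = true
    · rw [if_pos hmem, if_pos (hcont.symm.trans hmem)]
      exact ⟨by omega, hrel1⟩
    · rw [if_neg hmem, if_neg (fun hb => hmem (hcont.trans hb))]
      have hrel2 := RelV_add_in hrel1 ny nx d2 hd20 hd24
      obtain ⟨hv, hr⟩ := ih _ _ _ ny nx d2 (steps + 1) hrel2 hd20 hd24
      exact ⟨by rw [hv]; ring, hr⟩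

-- the whole state relation carried around the triple loops
def RelSt (stA : SetK × List Int) (stB : StB) : Prop :=
  RelV stA.1 stB.1 stB.2.1 ∧ stA.2 = stB.2.2

-- the two innermost-loop bodies correspond
lemma inner_eq (grid : List String) (rows cols : Int) (fuel : Nat) (i j : Int)
    {stA : SetK × List Int} {stB : StB} (m : Int) (h0 : 0 ≤ m) (h4 : m < 4)
    (h : RelSt stA stB) :
    RelSt (innerA grid rows cols fuel i j stA m) (innerB grid rows cols fuel i j stB (movesGet m)) := by
  obtain ⟨hrel, hans⟩ := h
  unfold innerA innerB
  have hcont := contains_eq_of_relV_out hrel i j m h0 h4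
  by_cases hmem : PySem.Set.contains stA.1 (i, j, m, 1) = true
  · rw [if_neg (not_not_intro hmem), if_pos (hcont.symm.trans hmem)]
    exact ⟨hrel, hans⟩
  · rw [if_pos hmem, if_neg (fun hb => hmem (hcont.trans hb))]
    obtain ⟨hv, hr⟩ := walkB_eq_dfsA grid rows cols fuel stA.1 stB.1 stB.2.1 i j m 0 hrel h0 h4
    refine ⟨hr, ?_⟩
    simp [hans, hv]

-- one pass of the direction loop: A over range(4), B over the four unit vectors
lemma inner4_eq (grid : List String) (rows cols : Int) (fuel : Nat) (i j : Int)
    {stA : SetK × List Int} {stB : StB} (h : RelSt stA stB) :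
    RelSt ((PySem.List.pyRange 0 4 1).foldl (innerA grid rows cols fuel i j) stA)
          ([((0:Int), (1:Int)), (1, 0), (0, -1), (-1, 0)].foldl (innerB grid rows cols fuel i j) stB) := by
  have hr : PySem.List.pyRange 0 4 1 = [0, 1, 2, 3] := by decide
  have hl : [((0:Int), (1:Int)), (1, 0), (0, -1), (-1, 0)]
      = [movesGet 0, movesGet 1, movesGet 2, movesGet 3] := by decide
  rw [hr, hl]
  simp only [List.foldl_cons, List.foldl_nil]
  exact inner_eq grid rows cols fuel i j 3 (by norm_num) (by norm_num)
    (inner_eq grid rows cols fuel i j 2 (by norm_num) (by norm_num)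
      (inner_eq grid rows cols fuel i j 1 (by norm_num) (by norm_num)
        (inner_eq grid rows cols fuel i j 0 (by norm_num) (by norm_num) h)))

-- generic paired fold over the same index list, preserving a relation
lemma foldl_rel {α β γ : Type} (R : α → β → Prop) (f : α → γ → α) (g : β → γ → β)
    (l : List γ) (h : ∀ a b c, R a b → R (f a c) (g b c)) :
    ∀ a b, R a b → R (l.foldl f a) (l.foldl g b) := by
  induction l with
  | nil => intro a b hab; simpa using hab
  | cons x xs ih =>
    intro a b hab
    simp only [List.foldl_cons]
    exact ih (f a x) (g b x) (h a b x hab)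

lemma fold_col (grid : List String) (rows cols : Int) (fuel : Nat) (i : Int)
    {stA : SetK × List Int} {stB : StB} (h : RelSt stA stB) :
    RelSt ((PySem.List.pyRange 0 cols 1).foldl (fun st j =>
            (PySem.List.pyRange 0 4 1).foldl (innerA grid rows cols fuel i j) st) stA)
          ((PySem.List.pyRange 0 cols 1).foldl (fun st sj =>
            [((0:Int), (1:Int)), (1, 0), (0, -1), (-1, 0)].foldl (innerB grid rows cols fuel i sj) st) stB) :=
  foldl_rel RelSt _ _ _ (fun _ _ j hR => inner4_eq grid rows cols fuel i j hR) _ _ h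

lemma fold_eq (grid : List String) (rows cols : Int) (fuel : Nat) :
    RelSt
      ((PySem.List.pyRange 0 rows 1).foldl (fun st i =>
        (PySem.List.pyRange 0 cols 1).foldl (fun st j =>
          (PySem.List.pyRange 0 4 1).foldl (innerA grid rows cols fuel i j) st) st)
        ((PySem.Set.empty : SetK), ([] : List Int)))
      ((PySem.List.pyRange 0 rows 1).foldl (fun st si =>
        (PySem.List.pyRange 0 cols 1).foldl (fun st sj =>
          [((0:Int), (1:Int)), (1, 0), (0, -1), (-1, 0)].foldl (innerB grid rows cols fuel si sj) st) st)
        ((PySem.Set.empty : PySem.Set (Int × Int × Int × Int)),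
         (PySem.Set.empty : PySem.Set (Int × Int × Int × Int)), ([] : List Int))) :=
  foldl_rel RelSt _ _ _ (fun _ _ i hR => fold_col grid rows cols fuel i hR) _ _
    ⟨fun a b d _ _ => by constructor <;> simp [PySem.Set.empty], rfl⟩

-- sorting is a no-op on []: A's guarded sort equals B's unconditional sort
lemma sort_guard (l : List Int) :
    (if l = [] then l else PySem.List.sorted l (fun x => x) false) = PySem.List.sorted l (fun x => x) false := by
  split_ifs with h
  · rw [h]
    exact ((PySem.List.sorted_eq_nil_iff ([] : List Int) (fun x => x) false).mpr rfl).symm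
  · rfl

-- ===== VERDICT (by name: the statement is the Claim_ definition above) =====
theorem solution_spec : Claim_equal_solution := by
  intro grid _ _
  unfold Spec_solution solution solution_alt
  dsimp only
  rw [sort_guard, (fold_eq grid _ _ _).2]
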